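-- pv_equiv track=rewrite | github.com/benedettacandelori/ADM3_Group6 | search_engine.py | vocabulary_conversion
-- ===== SOURCE A (Python) =====
-- def vocabulary_conversion(words_list, vocabulary):
--     '''
--     this function converts a list of words according to a certain vocabulary
--
--     input: (list of words to convert, vocabulary)
--     output: list of word ids according to the vocabulary
--     '''
--
--     ids = []
--
--     for word in words_list:
--         if word in vocabulary.keys():
--             ids.append(vocabulary[word])
--         else:
--             ids = []
--             break
--
--     return(ids)
-- ===== SOURCE B (Python) =====
-- def vocabulary_conversion(words_list, vocabulary):
--     '''
--     this function converts a list of words according to a certain vocabulary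
--
--     input: (list of words to convert, vocabulary)
--     output: list of word ids according to the vocabulary
--     '''
--     if all(word in vocabulary for word in words_list):
--         return [vocabulary[word] for word in words_list]
--     return []
-- ===== Notes on version B (the rewrite author's own statement) =====
-- stated objective: simpler
-- what changed: Replaces the single accumulate-and-reset loop (append ids, reset to [] and break on a miss) by a validate-then-build decomposition: one pass checks all words are in the vocabulary, a second builds the id list by comprehension.
import Mathlib
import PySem

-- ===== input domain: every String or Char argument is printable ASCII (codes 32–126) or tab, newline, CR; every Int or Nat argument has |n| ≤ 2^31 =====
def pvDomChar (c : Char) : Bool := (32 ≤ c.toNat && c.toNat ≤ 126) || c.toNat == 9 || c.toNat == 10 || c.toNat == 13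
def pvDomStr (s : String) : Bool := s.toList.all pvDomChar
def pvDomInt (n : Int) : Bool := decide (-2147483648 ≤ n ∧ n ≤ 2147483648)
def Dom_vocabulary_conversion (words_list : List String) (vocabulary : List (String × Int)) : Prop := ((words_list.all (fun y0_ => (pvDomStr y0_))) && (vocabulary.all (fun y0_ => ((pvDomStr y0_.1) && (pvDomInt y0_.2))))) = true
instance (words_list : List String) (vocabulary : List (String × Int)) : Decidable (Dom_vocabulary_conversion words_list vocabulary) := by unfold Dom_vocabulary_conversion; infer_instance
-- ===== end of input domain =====

-- B replaces A's accumulate-and-reset loop by a validate-then-build decomposition (simpler; same O(n) passes).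

-- ===== PORT A =====
-- dict[str,int] is an association list; lookup = first match (Python dicts have unique keys).
def vcLookup (vocabulary : List (String × Int)) (w : String) : Option Int :=
  (vocabulary.find? (fun p => p.1 == w)).map (·.2)

-- the for-loop of A: accumulates ids; on a missing word resets ids to [] and breaks
def vcLoopA (vocabulary : List (String × Int)) : List String → List Int → List Int
  | [], ids => ids
  | w :: rest, ids =>
    match vcLookup vocabulary w with
    | some v => vcLoopA vocabulary rest (ids ++ [v])
    | none => []

def vocabulary_conversion (words_list : List String) (vocabulary : List (String × Int)) : List Int :=
  vcLoopA vocabulary words_list []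

-- ===== PORT B =====
def vocabulary_conversion_alt (words_list : List String) (vocabulary : List (String × Int)) : List Int :=
  if words_list.all (fun w => (vcLookup vocabulary w).isSome) then
    words_list.map (fun w => (vcLookup vocabulary w).getD 0)
  else []

-- ===== PRECONDITION & SPEC =====
def Spec_vocabulary_conversion (words_list : List String) (vocabulary : List (String × Int)) (out : List Int) : Prop := out = vocabulary_conversion_alt words_list vocabulary
instance (words_list : List String) (vocabulary : List (String × Int)) (out : List Int) : Decidable (Spec_vocabulary_conversion words_list vocabulary out) := by unfold Spec_vocabulary_conversion; infer_instance

-- ===== CLAIM (what is proved, stated in full; the proofs are below) =====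
def Claim_equal_vocabulary_conversion : Prop := ∀ (words_list : List String) (vocabulary : List (String × Int)), Dom_vocabulary_conversion words_list vocabulary → Spec_vocabulary_conversion words_list vocabulary (vocabulary_conversion words_list vocabulary)

-- ===== LEMMAS AND PROOFS =====
theorem vcLoopA_eq (vocabulary : List (String × Int)) :
    ∀ (ws : List String) (ids : List Int),
      vcLoopA vocabulary ws ids =
        if ws.all (fun w => (vcLookup vocabulary w).isSome) then
          ids ++ ws.map (fun w => (vcLookup vocabulary w).getD 0)
        else [] := by
  intro ws
  induction ws with
  | nil => intro ids; simp [vcLoopA]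
  | cons w rest ih =>
    intro ids
    cases h : vcLookup vocabulary w with
    | none => simp [vcLoopA, h]
    | some v => simp [vcLoopA, h, ih]

theorem vocabulary_conversion_spec : Claim_equal_vocabulary_conversion := by
  intro words_list vocabulary _
  unfold Spec_vocabulary_conversion vocabulary_conversion vocabulary_conversion_alt
  simp [vcLoopA_eq]
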